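-- pv_equiv track=rewrite | github.com/mirqwa/coderbyte-solutions | medium/dash_insert_2.py | dash_insert_2
-- ===== SOURCE A (Python) =====
-- def dash_insert_2(str_num):
--     new_str = ""
--     for i in range(len(str_num)):
--         new_str += str_num[i]
--         if i < len(str_num) - 1:
--             if int(str_num[i]) % 2 == 0 and int(str_num[i + 1]) % 2 == 0:
--                 new_str += "*"
--             elif int(str_num[i]) % 2 == 1 and int(str_num[i + 1]) % 2 == 1:
--                 new_str += "-"
--     return new_str
-- ===== SOURCE B (Python) =====
-- def dash_insert_2(str_num):
--     if len(str_num) < 2: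
--         return str_num
--     parts = []
--     i = 0
--     n = len(str_num)
--     while i < n:
--         k = int(str_num[i]) % 2
--         j = i + 1
--         while j < n and int(str_num[j]) % 2 == k:
--             j += 1
--         parts.append(("*" if k == 0 else "-").join(str_num[i:j]))
--         i = j
--     return "".join(parts)
-- ===== Notes on version B (the rewrite author's own statement) =====
-- stated objective: alternative
-- what changed: A walks adjacent index pairs appending a separator per pair; B returns trivial inputs directly and otherwise scans maximal same-parity runs with two pointers, joining each run with its separator.
import Mathlib
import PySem

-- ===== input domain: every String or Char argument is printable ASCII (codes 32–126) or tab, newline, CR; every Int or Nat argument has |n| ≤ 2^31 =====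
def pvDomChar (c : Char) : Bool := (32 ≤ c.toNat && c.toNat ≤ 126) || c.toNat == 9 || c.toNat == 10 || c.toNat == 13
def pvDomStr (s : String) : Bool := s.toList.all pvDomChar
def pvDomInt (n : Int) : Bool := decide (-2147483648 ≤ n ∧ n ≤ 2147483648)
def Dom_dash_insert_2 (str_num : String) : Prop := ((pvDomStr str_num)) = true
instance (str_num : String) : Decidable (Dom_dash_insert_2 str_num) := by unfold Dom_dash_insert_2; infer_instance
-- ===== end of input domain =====

-- B replaces A's per-adjacent-pair separator loop by a two-pointer scan over maximal same-parity runs,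
-- joining each run with its separator (alternative decomposition, same cost).


-- ===== PORT A =====
-- int(str_num[i]) % 2 of a one-character slice; Python raises where ofChars? is none,
-- those inputs are excluded by Pre_ (the .getD 0 is never reached inside Pre_).
def pyIntMod2 (c : Char) : Int := PySem.Int.mod ((PySem.Int.ofChars? [c]).getD 0) 2

def dash_insert_2 (str_num : String) : String :=
  let cs := str_num.toList
  let n := cs.length
  String.ofList ((List.range n).foldl (init := []) (fun new_str i =>
    let new_str := new_str ++ [cs.getD i ' ']
    if i < n - 1 then
      if pyIntMod2 (cs.getD i ' ') == 0 && pyIntMod2 (cs.getD (i + 1) ' ') == 0 then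
        new_str ++ ['*']
      else if pyIntMod2 (cs.getD i ' ') == 1 && pyIntMod2 (cs.getD (i + 1) ' ') == 1 then
        new_str ++ ['-']
      else new_str
    else new_str))

-- ===== PORT B =====
-- inner while loop of Source B: consume the maximal prefix whose parity key equals k
def takeRun (k : Int) : List Char → List Char × List Char
  | [] => ([], [])
  | c :: rest =>
      if pyIntMod2 c == k then
        let p := takeRun k rest
        (c :: p.1, p.2)
      else ([], c :: rest)

theorem takeRun_snd_length (k : Int) (l : List Char) : (takeRun k l).2.length ≤ l.length := by
  induction l with
  | nil => simp [takeRun]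
  | cons c rest ih =>
      simp only [takeRun]
      split
      · simpa using Nat.le_succ_of_le ih
      · simp

-- outer while loop of Source B: split the string into maximal same-parity runs with their key
def groupByParity : List Char → List (Int × List Char)
  | [] => []
  | c :: rest =>
      let k := pyIntMod2 c
      let p := takeRun k rest
      (k, c :: p.1) :: groupByParity p.2
termination_by l => l.length
decreasing_by
  exact Nat.lt_succ_of_le (takeRun_snd_length _ _)

def dash_insert_2_alt (str_num : String) : String :=
  if str_num.toList.length < 2 then str_num
  else
    let parts := (groupByParity str_num.toList).map (fun kg =>
      PySem.Chars.join (if kg.1 == 0 then ['*'] else ['-']) (kg.2.map (fun c => [c])))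
    String.ofList (PySem.Chars.join [] parts)

-- ===== PRECONDITION & SPEC =====
-- Pre_ excludes exactly the strings of length ≥ 2 containing a non-digit character,
-- on which Python A raises ValueError (int() of a non-digit); A returns on everything else.
def Pre_dash_insert_2 (str_num : String) : Prop :=
  str_num.toList.length ≤ 1 ∨ (str_num.toList.all (fun c => c.isDigit)) = true
instance (str_num : String) : Decidable (Pre_dash_insert_2 str_num) := by
  unfold Pre_dash_insert_2; infer_instance

def pvWitness_dash_insert_2 : String := "99946"

def Spec_dash_insert_2 (str_num : String) (out : String) : Prop := out = dash_insert_2_alt str_num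
instance (str_num : String) (out : String) : Decidable (Spec_dash_insert_2 str_num out) := by unfold Spec_dash_insert_2; infer_instance

-- ===== CLAIM (what is proved, stated in full; the proofs are below) =====
def Claim_equal_dash_insert_2 : Prop := ∀ (str_num : String), Dom_dash_insert_2 str_num → Pre_dash_insert_2 str_num → Spec_dash_insert_2 str_num (dash_insert_2 str_num)

-- ===== LEMMAS AND PROOFS =====

-- the separator A inserts between adjacent characters
def sep2 (c1 c2 : Char) : List Char :=
  if pyIntMod2 c1 == 0 && pyIntMod2 c2 == 0 then ['*']
  else if pyIntMod2 c1 == 1 && pyIntMod2 c2 == 1 then ['-']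
  else []

-- canonical cons-cons recursion both programs satisfy
def dashSpec : List Char → List Char
  | [] => []
  | [c] => [c]
  | c1 :: c2 :: rest => c1 :: (sep2 c1 c2 ++ dashSpec (c2 :: rest))

theorem pyIntMod2_zero_or_one (c : Char) : pyIntMod2 c = 0 ∨ pyIntMod2 c = 1 := by
  have h1 := PySem.Int.mod_nonneg ((PySem.Int.ofChars? [c]).getD 0) (b := 2) (by norm_num)
  have h2 := PySem.Int.mod_lt ((PySem.Int.ofChars? [c]).getD 0) (b := 2) (by norm_num)
  unfold pyIntMod2
  omega

-- A's chunk at index i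
def achunk (cs : List Char) (i : Nat) : List Char :=
  [cs.getD i ' '] ++ (if i < cs.length - 1 then sep2 (cs.getD i ' ') (cs.getD (i + 1) ' ') else [])

theorem a_eq_flatMap (cs : List Char) :
    (List.range cs.length).foldl (init := ([] : List Char)) (fun new_str i =>
      let new_str := new_str ++ [cs.getD i ' ']
      if i < cs.length - 1 then
        if pyIntMod2 (cs.getD i ' ') == 0 && pyIntMod2 (cs.getD (i + 1) ' ') == 0 then
          new_str ++ ['*']
        else if pyIntMod2 (cs.getD i ' ') == 1 && pyIntMod2 (cs.getD (i + 1) ' ') == 1 then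
          new_str ++ ['-']
        else new_str
      else new_str) =
    (List.range cs.length).flatMap (achunk cs) := by
  rw [PySem.List.foldl_congr_mem _ _ (fun acc i => acc ++ achunk cs i) _ ?_]
  · simpa using PySem.List.foldl_append_eq_flatMap (achunk cs) (List.range cs.length) []
  · intro acc i _
    simp only [achunk, sep2]
    split_ifs <;> simp_all

theorem achunk_shift (c1 : Char) (cs : List Char) (hne : cs ≠ []) (i : Nat) :
    achunk (c1 :: cs) (i + 1) = achunk cs i := by
  have hlen : 0 < cs.length := List.length_pos_iff.mpr hne
  simp only [achunk, List.getD, List.getElem?_cons_succ, List.length_cons]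
  have : i + 1 < cs.length + 1 - 1 ↔ i < cs.length - 1 := by omega
  rw [if_congr this rfl rfl]

theorem flatMap_achunk_eq_spec (cs : List Char) :
    (List.range cs.length).flatMap (achunk cs) = dashSpec cs := by
  induction cs with
  | nil => simp [dashSpec]
  | cons c1 cs ih =>
      cases cs with
      | nil => simp [dashSpec, achunk]
      | cons c2 rest =>
          rw [List.length_cons, List.range_succ_eq_map]
          simp only [List.flatMap_cons, List.flatMap_map]
          have hshift : ∀ i, achunk (c1 :: c2 :: rest) (i + 1) = achunk (c2 :: rest) i :=
            achunk_shift c1 (c2 :: rest) (by simp)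
          have : (List.range (c2 :: rest).length).flatMap
              (fun i => achunk (c1 :: c2 :: rest) (i + 1)) =
              (List.range (c2 :: rest).length).flatMap (achunk (c2 :: rest)) := by
            exact List.flatMap_congr (fun i _ => hshift i)
          rw [this, ih]
          simp only [dashSpec, achunk]
          simp [List.getD]

-- join with empty separator peels one part
theorem join_nil_cons (p : List Char) (rest : List (List Char)) :
    PySem.Chars.join [] (p :: rest) = p ++ PySem.Chars.join [] rest := by
  cases rest with
  | nil => simp [PySem.Chars.join_singleton, PySem.Chars.join_nil]
  | cons q r => rw [PySem.Chars.join_cons_cons]; simp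

-- B as a list function
def blist (cs : List Char) : List Char :=
  PySem.Chars.join [] ((groupByParity cs).map (fun kg =>
    PySem.Chars.join (if kg.1 == 0 then ['*'] else ['-']) (kg.2.map (fun c => [c]))))

theorem blist_cons_cons (c1 c2 : Char) (rest : List Char) :
    blist (c1 :: c2 :: rest) = c1 :: (sep2 c1 c2 ++ blist (c2 :: rest)) := by
  by_cases h : pyIntMod2 c2 == pyIntMod2 c1
  · have hk : pyIntMod2 c2 = pyIntMod2 c1 := by exact_mod_cast beq_iff_eq.mp h
    have hsep : sep2 c1 c2 = (if pyIntMod2 c1 == 0 then ['*'] else ['-']) := by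
      rcases pyIntMod2_zero_or_one c1 with h0 | h0 <;> simp [sep2, hk, h0]
    simp only [blist, groupByParity, takeRun, hk, beq_self_eq_true, ite_true, List.map_cons]
    rw [join_nil_cons, join_nil_cons]
    simp only [hsep]
    rw [PySem.Chars.join_cons_cons]
    simp
  · have : takeRun (pyIntMod2 c1) (c2 :: rest) = ([], c2 :: rest) := by
      simp [takeRun, h]
    have hsep : sep2 c1 c2 = [] := by
      have hne : pyIntMod2 c2 ≠ pyIntMod2 c1 := by
        intro he; exact h (by simp [he])
      rcases pyIntMod2_zero_or_one c1 with h0 | h0 <;>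
        rcases pyIntMod2_zero_or_one c2 with h1 | h1 <;>
          simp_all [sep2]
    simp only [blist, groupByParity, this, List.map_cons]
    rw [join_nil_cons]
    simp [PySem.Chars.join_singleton, hsep]

theorem blist_eq_spec (cs : List Char) : blist cs = dashSpec cs := by
  induction cs with
  | nil => simp [blist, groupByParity, dashSpec, PySem.Chars.join_nil]
  | cons c1 cs ih =>
      cases cs with
      | nil =>
          simp [blist, groupByParity, takeRun, dashSpec, PySem.Chars.join_singleton]
      | cons c2 rest =>
          rw [blist_cons_cons, ih]
          rfl

-- ===== VERDICT (by name: the statement is the Claim_ definition above) =====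
theorem a_eq_spec (s : String) : dash_insert_2 s = String.ofList (dashSpec s.toList) := by
  unfold dash_insert_2
  simp only []
  rw [a_eq_flatMap, flatMap_achunk_eq_spec]

theorem dash_insert_2_spec : Claim_equal_dash_insert_2 := by
  intro s _ _
  unfold Spec_dash_insert_2 dash_insert_2_alt
  by_cases h : s.toList.length < 2
  · rw [if_pos h, a_eq_spec]
    conv_rhs => rw [← String.ofList_toList (s := s)]
    rcases hcs : s.toList with _ | ⟨c, _ | ⟨d, tl⟩⟩
    · rfl
    · rfl
    · rw [hcs] at h; simp at h
  · rw [if_neg h, a_eq_spec, ← blist_eq_spec]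
    rfl
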